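-- pv_equiv track=rewrite | github.com/DedalusProject/dedalus_sphere | dedalus_sphere/intertwiner.py | index2tuple
-- ===== SOURCE A (Python) =====
-- def index2tuple(index,rank,indexing=(-1,1,0)):
--
--     tup = []
--     while index > 0:
--
--         tup = [indexing[index%3]] + tup
--         index //= 3
--
--     r = len(tup)
--     if r < rank:
--         tup = (rank-r)*[indexing[0]] + tup
--
--     if r > rank: raise ValueError('tensor rank smaller than tuple length.')
--
--     return tuple(tup)
-- ===== SOURCE B (Python) =====
-- def index2tuple(index, rank, indexing=(-1, 1, 0)):
--     if index <= 0:
--         return tuple(rank * [indexing[0]])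
--     d = 0
--     p = 1
--     while p <= index:
--         p *= 3
--         d += 1
--     if d > rank:
--         raise ValueError('tensor rank smaller than tuple length.')
--     body = []
--     for _ in range(d):
--         p //= 3
--         body.append(indexing[index // p % 3])
--     return tuple((rank - d) * [indexing[0]] + body)
-- ===== Notes on version B (the rewrite author's own statement) =====
-- stated objective: alternative
-- what changed: Replaces A's variable-length divide-and-prepend loop plus left-padding by counting the base-3 digits once and then emitting each slot's digit most-significant-first via index // p % 3; Pre_ excludes exactly the inputs where A raises ValueError (negative rank or index >= 3**rank).
import Mathlib
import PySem

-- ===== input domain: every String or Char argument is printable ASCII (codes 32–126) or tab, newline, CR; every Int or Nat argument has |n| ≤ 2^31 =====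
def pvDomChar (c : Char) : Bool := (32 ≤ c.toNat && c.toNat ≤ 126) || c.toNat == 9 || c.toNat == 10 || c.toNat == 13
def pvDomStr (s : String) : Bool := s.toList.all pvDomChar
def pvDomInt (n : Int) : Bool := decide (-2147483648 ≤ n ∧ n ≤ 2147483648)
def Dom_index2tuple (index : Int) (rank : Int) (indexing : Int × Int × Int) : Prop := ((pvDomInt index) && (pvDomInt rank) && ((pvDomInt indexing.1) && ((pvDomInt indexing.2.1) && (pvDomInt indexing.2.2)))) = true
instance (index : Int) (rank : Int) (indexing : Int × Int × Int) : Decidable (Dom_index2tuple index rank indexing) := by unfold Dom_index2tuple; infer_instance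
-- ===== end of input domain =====

-- B replaces A's variable-length divide-loop-prepend-then-pad construction by counting the
-- base-3 digits once and emitting them most-significant-first (objective: alternative).

-- ===== PORT A =====
-- indexing[d] for d = 0,1,2 (a 3-tuple indexed by the value of a '% 3' expression)
def pvPick (t : Int × Int × Int) (d : Int) : Int :=
  if d = 0 then t.1 else if d = 1 then t.2.1 else t.2.2

-- the 'while index > 0' loop of A: prepend indexing[index % 3], then index //= 3
def pvLoopA (t : Int × Int × Int) (index : Int) (tup : List Int) : List Int :=
  if h : 0 < index then
    pvLoopA t (PySem.Int.floordiv index 3) (pvPick t (PySem.Int.mod index 3) :: tup)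
  else tup
termination_by index.toNat
decreasing_by
  have h3 : PySem.Int.floordiv index 3 = index / 3 :=
    PySem.Int.floordiv_eq_ediv_of_pos (by norm_num)
  rw [h3]; omega

def index2tuple (index : Int) (rank : Int) (indexing : Int × Int × Int) : List Int :=
  let tup := pvLoopA indexing index []
  let r : Int := tup.length
  let tup2 := if r < rank then List.replicate (rank - r).toNat indexing.1 ++ tup else tup
  if r > rank then [] else tup2   -- [] stands for the ValueError branch (outside Pre_)

-- ===== PORT B =====
-- the 'while p <= index' digit-counting loop of B ('0 < p' is a totality guard only: p starts at 1 and only grows)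
def pvCount (index : Int) (p : Int) (d : Nat) : Nat × Int :=
  if h : p ≤ index ∧ 0 < p then pvCount index (p * 3) (d + 1) else (d, p)
termination_by (index + 1 - p).toNat
decreasing_by omega

-- the 'for _ in range(d): p //= 3; body.append(indexing[index // p % 3])' loop of B
def pvBuild (t : Int × Int × Int) (index : Int) : Nat → Int → List Int → List Int
  | 0, _, acc => acc
  | m + 1, p, acc =>
    let p' := PySem.Int.floordiv p 3
    pvBuild t index m p' (acc ++ [pvPick t (PySem.Int.mod (PySem.Int.floordiv index p') 3)])

def index2tuple_alt (index : Int) (rank : Int) (indexing : Int × Int × Int) : List Int :=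
  if index ≤ 0 then List.replicate rank.toNat indexing.1   -- rank*[indexing[0]]
  else
    let dp := pvCount index 1 0
    if (dp.1 : Int) > rank then []             -- ValueError branch (outside Pre_)
    else List.replicate (rank - (dp.1 : Int)).toNat indexing.1 ++ pvBuild indexing index dp.1 dp.2 []

-- ===== PRECONDITION & SPEC =====
-- Pre_ is exactly where Python A returns: otherwise A raises ValueError (negative rank, or
-- more base-3 digits than rank, i.e. index >= 3**rank).
def Pre_index2tuple (index : Int) (rank : Int) (indexing : Int × Int × Int) : Prop :=
  0 ≤ rank ∧ index < 3 ^ rank.toNat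
instance (index : Int) (rank : Int) (indexing : Int × Int × Int) : Decidable (Pre_index2tuple index rank indexing) := by unfold Pre_index2tuple; infer_instance

def pvWitness_index2tuple : Int × Int × (Int × Int × Int) := (5, 2, (-1, 1, 0))

def Spec_index2tuple (index : Int) (rank : Int) (indexing : Int × Int × Int) (out : List Int) : Prop := out = index2tuple_alt index rank indexing
instance (index : Int) (rank : Int) (indexing : Int × Int × Int) (out : List Int) : Decidable (Spec_index2tuple index rank indexing out) := by unfold Spec_index2tuple; infer_instance

-- ===== CLAIM (what is proved, stated in full; the proofs are below) =====
def Claim_equal_index2tuple : Prop := ∀ (index : Int) (rank : Int) (indexing : Int × Int × Int), Dom_index2tuple index rank indexing → Pre_index2tuple index rank indexing → Spec_index2tuple index rank indexing (index2tuple index rank indexing)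

-- ===== LEMMAS AND PROOFS =====

-- base-3 digits of n, most significant first (the list A's while loop builds, before mapping)
def pvDigs (n : Nat) : List Nat :=
  if h : n = 0 then [] else pvDigs (n / 3) ++ [n % 3]
termination_by n
decreasing_by exact Nat.div_lt_self (Nat.pos_of_ne_zero h) (by norm_num)

theorem pvLoopA_nonpos (t : Int × Int × Int) (index : Int) (tup : List Int)
    (h : index ≤ 0) : pvLoopA t index tup = tup := by
  rw [pvLoopA]; simp [Int.not_lt.mpr h]

theorem pvLoopA_eq_digs (t : Int × Int × Int) :
    ∀ n : Nat, ∀ tup : List Int,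
      pvLoopA t (n : Int) tup = (pvDigs n).map (fun d : Nat => pvPick t (d : Int)) ++ tup := by
  intro n
  induction n using Nat.strong_induction_on with
  | _ n ih =>
    intro tup
    rw [pvLoopA, pvDigs]
    by_cases h0 : n = 0
    · simp [h0]
    · have hpos : (0 : Int) < n := by exact_mod_cast Nat.pos_of_ne_zero h0
      rw [dif_pos hpos, dif_neg h0]
      have hd : PySem.Int.floordiv (n : Int) 3 = ((n / 3 : Nat) : Int) := by
        exact_mod_cast PySem.Int.floordiv_natCast n 3
      have hm : PySem.Int.mod (n : Int) 3 = ((n % 3 : Nat) : Int) := by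
        exact_mod_cast PySem.Int.mod_natCast n 3
      rw [hd, hm, ih (n / 3) (Nat.div_lt_self (Nat.pos_of_ne_zero h0) (by norm_num))]
      simp

theorem pvDigs_len_le : ∀ k n : Nat, n < 3 ^ k → (pvDigs n).length ≤ k := by
  intro k
  induction k with
  | zero => intro n hn; interval_cases n; simp [pvDigs]
  | succ k ih =>
    intro n hn
    rw [pvDigs]
    by_cases h0 : n = 0
    · simp [h0]
    · rw [dif_neg h0]
      have : n / 3 < 3 ^ k :=
        Nat.div_lt_of_lt_mul (by rw [← pow_succ']; exact hn)
      simpa using Nat.succ_le_succ (ih _ this)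

-- splitting off the leading digit: digits of q*3^k + n' for 1 ≤ q < 3, n' < 3^k
theorem pvDigs_split : ∀ k q n' : Nat, 1 ≤ q → q < 3 → n' < 3 ^ k →
    pvDigs (q * 3 ^ k + n') =
      q :: (List.replicate (k - (pvDigs n').length) 0 ++ pvDigs n') := by
  intro k
  induction k with
  | zero =>
    intro q n' hq1 hq3 hn'
    interval_cases n'
    interval_cases q <;> simp [pvDigs]
  | succ k ih =>
    intro q n' hq1 hq3 hn'
    have hN0 : q * 3 ^ (k+1) + n' ≠ 0 := by positivity
    rw [pvDigs, dif_neg hN0]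
    have hdiv : (q * 3 ^ (k+1) + n') / 3 = q * 3 ^ k + n' / 3 := by
      have h : q * 3 ^ (k+1) + n' = 3 * (q * 3 ^ k) + n' := by ring
      rw [h, Nat.mul_add_div (by norm_num)]
    have hmod : (q * 3 ^ (k+1) + n') % 3 = n' % 3 := by
      have : q * 3 ^ (k+1) + n' = n' + (q * 3 ^ k) * 3 := by ring
      rw [this, Nat.add_mul_mod_self_right]
    have hn3 : n' / 3 < 3 ^ k :=
      Nat.div_lt_of_lt_mul (by rw [← pow_succ']; exact hn')
    rw [hdiv, hmod, ih q (n' / 3) hq1 hq3 hn3]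
    by_cases h0 : n' = 0
    · subst h0
      simp [pvDigs, List.replicate_succ' (n := k)]
    · conv_rhs => rw [pvDigs, dif_neg h0]
      have hL : (pvDigs (n' / 3) ++ [n' % 3]).length = (pvDigs (n' / 3)).length + 1 := by
        simp
      rw [hL]
      simp [Nat.succ_sub_succ]

-- the per-position digit formula produces exactly A's digit list padded with leading zeros
theorem pvPad_eq : ∀ k n : Nat, n < 3 ^ k →
    List.replicate (k - (pvDigs n).length) 0 ++ pvDigs n
      = ((List.range k).map (fun i => n / 3 ^ i % 3)).reverse := by
  intro k
  induction k with
  | zero => intro n hn; interval_cases n; simp [pvDigs]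
  | succ k ih =>
    intro n hn
    have hq3 : n / 3 ^ k < 3 := by
      apply Nat.div_lt_of_lt_mul
      rw [Nat.mul_comm, ← pow_succ']
      exact hn
    have hn' : n % 3 ^ k < 3 ^ k := Nat.mod_lt _ (by positivity)
    have htail : (List.range k).map (fun i => n / 3 ^ i % 3)
        = (List.range k).map (fun i => (n % 3 ^ k) / 3 ^ i % 3) := by
      apply List.map_congr_left
      intro i hi
      have hik : i < k := List.mem_range.mp hi
      have h1 : (n % 3 ^ k) / 3 ^ i = n / 3 ^ i % 3 ^ (k - i) := by
        rw [← Nat.mod_mul_right_div_self, ← pow_add,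
          Nat.add_sub_cancel' (le_of_lt hik)]
      rw [h1, Nat.mod_mod_of_dvd _ (dvd_pow_self 3 (by omega))]
    rw [List.range_succ, List.map_append, List.reverse_append, htail, ← ih _ hn']
    have hhead : n / 3 ^ k % 3 = n / 3 ^ k := Nat.mod_eq_of_lt hq3
    by_cases hq0 : n / 3 ^ k = 0
    · have hp : 0 < 3 ^ k := by positivity
      have hnk : n < 3 ^ k := by
        have := Nat.div_eq_zero_iff.mp hq0
        omega
      have hmod : n % 3 ^ k = n := Nat.mod_eq_of_lt hnk
      have hL : (pvDigs n).length ≤ k := pvDigs_len_le k n hnk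
      simp [hq0, hmod]
      rw [show k + 1 - (pvDigs n).length = (k - (pvDigs n).length) + 1 by omega,
        List.replicate_succ]
      simp
    · have hq1 : 1 ≤ n / 3 ^ k := Nat.pos_of_ne_zero hq0
      have hsplit := pvDigs_split k (n / 3 ^ k) (n % 3 ^ k) hq1 hq3 hn'
      rw [Nat.div_add_mod' n (3 ^ k)] at hsplit
      have hL' : (pvDigs (n % 3 ^ k)).length ≤ k := pvDigs_len_le k _ hn'
      have hLen : (pvDigs n).length = k + 1 := by
        rw [hsplit]; simp; omega
      rw [hLen, hsplit]
      simp [hhead]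

-- A's whole computation, for 0 < index < 3^k, as the padded digit list mapped through indexing
theorem pvA_eq_pad (t : Int × Int × Int) (index rank : Int) (hpos : 0 < index)
    (hr : 0 ≤ rank) (hi : index < 3 ^ rank.toNat) :
    index2tuple index rank t
      = (List.replicate (rank.toNat - (pvDigs index.toNat).length) 0
          ++ pvDigs index.toNat).map (fun d : Nat => pvPick t (d : Int)) := by
  have hcast : ((index.toNat : Int)) = index := Int.toNat_of_nonneg (le_of_lt hpos)
  have hnk : index.toNat < 3 ^ rank.toNat := by
    have : ((index.toNat : Int)) < ((3 ^ rank.toNat : Nat) : Int) := by push_cast; omega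
    exact_mod_cast this
  have hL : (pvDigs index.toNat).length ≤ rank.toNat := pvDigs_len_le _ _ hnk
  have hloop : pvLoopA t index []
      = (pvDigs index.toNat).map (fun d : Nat => pvPick t (d : Int)) := by
    conv_lhs => rw [← hcast]
    rw [pvLoopA_eq_digs t index.toNat [], List.append_nil]
  simp only [index2tuple, hloop, List.length_map]
  rw [if_neg (by omega : ¬ ((pvDigs index.toNat).length : Int) > rank)]
  by_cases hlt : ((pvDigs index.toNat).length : Int) < rank
  · rw [if_pos hlt, List.map_append, List.map_replicate]
    congr 2
    omega
  · have hLk : (pvDigs index.toNat).length = rank.toNat := by omega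
    rw [if_neg hlt, hLk, Nat.sub_self]
    simp

-- upper bound: n is below 3 to the power of its digit count
theorem pvDigs_lt_pow : ∀ n : Nat, n < 3 ^ (pvDigs n).length := by
  intro n
  induction n using Nat.strong_induction_on with
  | _ n ih =>
    by_cases h0 : n = 0
    · subst h0; simp [pvDigs]
    · rw [pvDigs, dif_neg h0]
      have hd := ih (n / 3) (Nat.div_lt_self (Nat.pos_of_ne_zero h0) (by norm_num))
      have hlen : (pvDigs (n / 3) ++ [n % 3]).length = (pvDigs (n / 3)).length + 1 := by simp
      rw [hlen, pow_succ]
      calc n < (n / 3 + 1) * 3 := by omega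
      _ ≤ 3 ^ (pvDigs (n / 3)).length * 3 := Nat.mul_le_mul_right 3 hd

-- the counting loop lands exactly on the digit count and its power of 3
theorem pvCount_eq (n : Nat) : ∀ m a : Nat, a ≤ (pvDigs n).length →
    (pvDigs n).length - a = m →
    pvCount (n : Int) ((3 ^ a : Nat) : Int) a
      = ((pvDigs n).length, ((3 ^ (pvDigs n).length : Nat) : Int)) := by
  intro m
  induction m with
  | zero =>
    intro a ha hm
    have haL : a = (pvDigs n).length := by omega
    subst haL
    rw [pvCount, dif_neg]
    intro hcon
    have h1 : (3 ^ (pvDigs n).length : Nat) ≤ n := by exact_mod_cast hcon.1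
    have := pvDigs_lt_pow n
    omega
  | succ m ih =>
    intro a ha hm
    have haL : a < (pvDigs n).length := by omega
    have h3 : 3 ^ a ≤ n := by
      by_contra hcon
      have := pvDigs_len_le a n (by omega)
      omega
    rw [pvCount, dif_pos ⟨by exact_mod_cast h3, by positivity⟩]
    have hc : ((3 ^ a : Nat) : Int) * 3 = ((3 ^ (a + 1) : Nat) : Int) := by
      push_cast; ring
    rw [hc]
    exact ih (a + 1) (by omega) (by omega)

-- the building loop emits the per-position digits, most significant first
theorem pvBuild_eq (t : Int × Int × Int) (n : Nat) : ∀ m : Nat, ∀ acc : List Int,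
    pvBuild t (n : Int) m ((3 ^ m : Nat) : Int) acc
      = acc ++ ((List.range m).map (fun i => n / 3 ^ i % 3)).reverse.map
          (fun d : Nat => pvPick t (d : Int)) := by
  intro m
  induction m with
  | zero => intro acc; simp [pvBuild]
  | succ m ih =>
    intro acc
    have hp : PySem.Int.floordiv ((3 ^ (m + 1) : Nat) : Int) 3 = ((3 ^ m : Nat) : Int) := by
      have h := PySem.Int.floordiv_natCast (3 ^ (m + 1)) 3
      have h2 : 3 ^ (m + 1) / 3 = 3 ^ m := by
        rw [pow_succ, Nat.mul_div_cancel _ (by norm_num)]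
      rw [h2] at h
      exact_mod_cast h
    have hd : PySem.Int.mod (PySem.Int.floordiv (n : Int) ((3 ^ m : Nat) : Int)) 3
        = ((n / 3 ^ m % 3 : Nat) : Int) := by
      rw [PySem.Int.floordiv_natCast n (3 ^ m)]
      exact_mod_cast PySem.Int.mod_natCast (n / 3 ^ m) 3
    simp only [pvBuild, hp, hd]
    rw [ih (acc ++ [pvPick t ((n / 3 ^ m % 3 : Nat) : Int)])]
    rw [List.range_succ, List.map_append, List.reverse_append]
    simp

-- B's whole computation, same hypotheses, as the same padded digit list
theorem pvB_eq_pad (t : Int × Int × Int) (index rank : Int) (hpos : 0 < index)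
    (hr : 0 ≤ rank) (hi : index < 3 ^ rank.toNat) :
    index2tuple_alt index rank t
      = (List.replicate (rank.toNat - (pvDigs index.toNat).length) 0
          ++ pvDigs index.toNat).map (fun d : Nat => pvPick t (d : Int)) := by
  have hcast : ((index.toNat : Int)) = index := Int.toNat_of_nonneg (le_of_lt hpos)
  have hnk : index.toNat < 3 ^ rank.toNat := by
    have : ((index.toNat : Int)) < ((3 ^ rank.toNat : Nat) : Int) := by push_cast; omega
    exact_mod_cast this
  have hL : (pvDigs index.toNat).length ≤ rank.toNat := pvDigs_len_le _ _ hnk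
  have hc : pvCount index 1 0
      = ((pvDigs index.toNat).length, ((3 ^ (pvDigs index.toNat).length : Nat) : Int)) := by
    conv_lhs => rw [← hcast]
    have h1 : (1 : Int) = ((3 ^ 0 : Nat) : Int) := by norm_num
    rw [h1]
    exact pvCount_eq index.toNat _ 0 (Nat.zero_le _) rfl
  have hdig : ((List.range (pvDigs index.toNat).length).map
        (fun i => index.toNat / 3 ^ i % 3)).reverse = pvDigs index.toNat := by
    have h := pvPad_eq (pvDigs index.toNat).length index.toNat (pvDigs_lt_pow index.toNat)
    simpa [Nat.sub_self] using h.symm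
  simp only [index2tuple_alt, hc]
  rw [if_neg (by omega : ¬ index ≤ 0),
    if_neg (by omega : ¬ ((pvDigs index.toNat).length : Int) > rank)]
  have hb := pvBuild_eq t index.toNat (pvDigs index.toNat).length []
  rw [hcast] at hb
  rw [hb, List.nil_append, hdig]
  rw [List.map_append, List.map_replicate]
  congr 2
  omega

-- ===== VERDICT (by name: the statement is the Claim_ definition above) =====
theorem index2tuple_spec : Claim_equal_index2tuple := by
  intro index rank t _ hpre
  obtain ⟨hr, hi⟩ := hpre
  unfold Spec_index2tuple
  by_cases hpos : 0 < index
  · rw [pvA_eq_pad t index rank hpos hr hi, pvB_eq_pad t index rank hpos hr hi]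
  · have hle : index ≤ 0 := by omega
    simp only [index2tuple, index2tuple_alt, pvLoopA_nonpos t index [] hle]
    simp only [List.length_nil, Nat.cast_zero]
    rw [if_pos hle, if_neg (by omega : ¬ ((0 : Int) > rank))]
    by_cases h0 : (0 : Int) < rank
    · rw [if_pos h0]; simp
    · rw [if_neg h0]
      have : rank = 0 := by omega
      subst this
      simp
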